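-- pv_equiv track=rewrite | github.com/SzymonIwaniuk/wdi-2024-2025 | Zestaw3/zad105.py | zgodne
-- ===== SOURCE A (Python) =====
-- def zgodne(a, b):
--     cnta = cntb = 0
--     while a > 0:
--         if a % 2 == 1:
--             cnta += 1
--         a //= 2
--
--     while b > 0:
--         if  b % 2 == 1:
--             cntb += 1
--         b //= 2
--
--     return cnta == cntb
-- ===== SOURCE B (Python) =====
-- def zgodne(a, b):
--     cnta = cntb = 0
--     while a > 0:
--         a &= a - 1
--         cnta += 1
--     while b > 0:
--         b &= b - 1
--         cntb += 1
--     return cnta == cntb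
-- ===== Notes on version B (the rewrite author's own statement) =====
-- stated objective: idiomatic
-- what changed: Counts set bits with Brian Kernighan's trick (x &= x-1 clears one set bit per iteration) instead of testing every bit position by repeated %2 / //2 halving.
import Mathlib
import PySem

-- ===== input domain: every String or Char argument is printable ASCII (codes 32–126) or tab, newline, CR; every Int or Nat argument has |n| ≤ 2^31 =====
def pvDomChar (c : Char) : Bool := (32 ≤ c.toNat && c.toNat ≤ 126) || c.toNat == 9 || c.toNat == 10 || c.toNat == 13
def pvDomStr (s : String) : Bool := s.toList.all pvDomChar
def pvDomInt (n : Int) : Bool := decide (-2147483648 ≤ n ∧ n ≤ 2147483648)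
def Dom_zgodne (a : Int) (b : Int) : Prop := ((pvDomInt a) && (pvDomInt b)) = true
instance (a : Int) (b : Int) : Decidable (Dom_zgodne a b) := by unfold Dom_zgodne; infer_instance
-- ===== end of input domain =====

-- B counts set bits with Kernighan's x &= x-1 trick instead of A's bit-by-bit %2 // 2 halving; same return value, no side effects.

-- ===== PORT A =====
-- the 'while a > 0' loop of A: tests the low bit with % 2, halves with //= 2
def zgodneLoop (x : Int) (cnt : Int) : Int :=
  if 0 < x then
    zgodneLoop (PySem.Int.floordiv x 2) (if PySem.Int.mod x 2 = 1 then cnt + 1 else cnt)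
  else cnt
termination_by x.toNat
decreasing_by
  rw [PySem.Int.floordiv_eq_ediv_of_pos (by omega)]
  omega

def zgodne (a : Int) (b : Int) : Bool :=
  decide (zgodneLoop a 0 = zgodneLoop b 0)

-- ===== PORT B =====
-- the 'while x > 0: x &= x - 1; cnt += 1' loop of B
def zgodneAltLoop (x : Int) (cnt : Int) : Int :=
  if 0 < x then
    zgodneAltLoop (PySem.Int.band x (x - 1)) (cnt + 1)
  else cnt
termination_by x.toNat
decreasing_by
  rename_i hx
  rw [PySem.Int.band_of_nonneg (by omega) (by omega)]
  have h1 : x.toNat &&& (x - 1).toNat ≤ (x - 1).toNat := Nat.and_le_right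
  omega

def zgodne_alt (a : Int) (b : Int) : Bool :=
  decide (zgodneAltLoop a 0 = zgodneAltLoop b 0)

-- ===== PRECONDITION & SPEC =====
def Spec_zgodne (a : Int) (b : Int) (out : Bool) : Prop := out = zgodne_alt a b
instance (a : Int) (b : Int) (out : Bool) : Decidable (Spec_zgodne a b out) := by unfold Spec_zgodne; infer_instance

-- ===== CLAIM (what is proved, stated in full; the proofs are below) =====
def Claim_equal_zgodne : Prop := ∀ (a : Int) (b : Int), Dom_zgodne a b → Spec_zgodne a b (zgodne a b)

-- ===== LEMMAS AND PROOFS =====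

-- A's loop adds the population count of x (0 for x ≤ 0) to the accumulator
theorem zgodneLoop_eq (x cnt : Int) :
    zgodneLoop x cnt = cnt + (PySem.Int.bitCount ((x.toNat : Nat) : Int) : Int) := by
  induction x, cnt using zgodneLoop.induct with
  | case1 x cnt hx ih =>
    have hfd : PySem.Int.floordiv x 2 = x / 2 := PySem.Int.floordiv_eq_ediv_of_pos (by omega)
    have hmd : PySem.Int.mod x 2 = x % 2 := PySem.Int.mod_eq_emod_of_pos (by omega)
    have hbc := PySem.Int.bitCount_natCast (m := x.toNat) (by omega)
    have htn : (x / 2).toNat = x.toNat / 2 := by omega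
    rw [hfd, hmd, htn] at ih
    by_cases hodd : x % 2 = 1
    · have h2 : x.toNat % 2 = 1 := by omega
      rw [dif_pos hodd] at ih
      rw [zgodneLoop, if_pos hx, hfd, hmd, if_pos hodd, ih, hbc, h2]
      push_cast; ring
    · have h2 : x.toNat % 2 = 0 := by omega
      rw [dif_neg hodd] at ih
      rw [zgodneLoop, if_pos hx, hfd, hmd, if_neg hodd, ih, hbc, h2]
      push_cast; ring
  | case2 x cnt hx =>
    rw [zgodneLoop, if_neg hx]
    have h0 : x.toNat = 0 := by omega
    simp [h0]

-- clearing the low set bit: odd case, (2m+1) &&& 2m = 2m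
theorem land_pred_odd (m : Nat) : (2 * m + 1) &&& (2 * m) = 2 * m := by
  apply Nat.eq_of_testBit_eq
  intro i
  cases i with
  | zero =>
    rw [Nat.testBit_land]
    simp only [Nat.testBit_zero]
    have h1 : (2 * m + 1) % 2 = 1 := by omega
    have h2 : (2 * m) % 2 = 0 := by omega
    simp [h1, h2]
  | succ i =>
    rw [Nat.testBit_land]
    simp only [Nat.testBit_succ]
    have h1 : (2 * m + 1) / 2 = m := by omega
    have h2 : (2 * m) / 2 = m := by omega
    rw [h1, h2, Bool.and_self]

-- clearing the low set bit: even case, 2m &&& (2m-1) = 2·(m &&& (m-1))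
theorem land_pred_even (m : Nat) (hm : 0 < m) :
    (2 * m) &&& (2 * m - 1) = 2 * (m &&& (m - 1)) := by
  apply Nat.eq_of_testBit_eq
  intro i
  cases i with
  | zero =>
    rw [Nat.testBit_land]
    simp only [Nat.testBit_zero]
    have h1 : (2 * m) % 2 = 0 := by omega
    have h2 : (2 * (m &&& (m - 1))) % 2 = 0 := by omega
    simp [h1, h2]
  | succ i =>
    rw [Nat.testBit_land]
    simp only [Nat.testBit_succ]
    have h1 : (2 * m) / 2 = m := by omega
    have h2 : (2 * m - 1) / 2 = m - 1 := by omega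
    have h3 : (2 * (m &&& (m - 1))) / 2 = m &&& (m - 1) := by omega
    rw [h1, h2, h3, Nat.testBit_land]

-- bitCount halves through an even number
theorem bitCount_double (k : Nat) :
    PySem.Int.bitCount ((2 * k : Nat) : Int) = PySem.Int.bitCount ((k : Nat) : Int) := by
  rcases Nat.eq_zero_or_pos k with hk | hk
  · simp [hk]
  · have h := PySem.Int.bitCount_natCast (m := 2 * k) (by omega)
    have h1 : (2 * k) % 2 = 0 := by omega
    have h2 : (2 * k) / 2 = k := by omega
    rw [h, h1, h2, Nat.zero_add]

-- Kernighan's step removes exactly one set bit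
theorem kern (n : Nat) (hn : 0 < n) :
    PySem.Int.bitCount ((n &&& (n - 1) : Nat) : Int) + 1 = PySem.Int.bitCount ((n : Nat) : Int) := by
  induction n using Nat.strong_induction_on with
  | _ n ih =>
    rcases Nat.even_or_odd n with ⟨m, hm⟩ | ⟨m, hm⟩
    · -- n = 2m, m > 0
      have hm2 : n = 2 * m := by omega
      have hmpos : 0 < m := by omega
      subst hm2
      rw [land_pred_even m hmpos, bitCount_double, bitCount_double]
      exact ih m (by omega) hmpos
    · -- n = 2m + 1
      have hm2 : n = 2 * m + 1 := by omega
      subst hm2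
      have hsub : 2 * m + 1 - 1 = 2 * m := by omega
      rw [hsub, land_pred_odd, bitCount_double]
      have h := PySem.Int.bitCount_natCast (m := 2 * m + 1) (by omega)
      have h1 : (2 * m + 1) % 2 = 1 := by omega
      have h2 : (2 * m + 1) / 2 = m := by omega
      rw [h, h1, h2, Nat.add_comm]

-- B's loop adds the same population count
theorem zgodneAltLoop_eq (x cnt : Int) :
    zgodneAltLoop x cnt = cnt + (PySem.Int.bitCount ((x.toNat : Nat) : Int) : Int) := by
  induction x, cnt using zgodneAltLoop.induct with
  | case1 x cnt hx ih =>
    rw [zgodneAltLoop, if_pos hx, ih]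
    have hb : PySem.Int.band x (x - 1) = ((x.toNat &&& (x - 1).toNat : Nat) : Int) :=
      PySem.Int.band_of_nonneg (by omega) (by omega)
    have hsub : (x - 1).toNat = x.toNat - 1 := by omega
    rw [hb, hsub]
    have hk := kern x.toNat (by omega)
    have htn : (((x.toNat &&& (x.toNat - 1) : Nat) : Int)).toNat = x.toNat &&& (x.toNat - 1) :=
      Int.toNat_natCast _
    rw [htn]
    push_cast [← hk]; ring
  | case2 x cnt hx =>
    rw [zgodneAltLoop, if_neg hx]
    have h0 : x.toNat = 0 := by omega
    simp [h0]

-- ===== VERDICT (by name: the statement is the Claim_ definition above) =====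
theorem zgodne_spec : Claim_equal_zgodne := by
  intro a b _
  unfold Spec_zgodne zgodne zgodne_alt
  rw [zgodneLoop_eq, zgodneLoop_eq, zgodneAltLoop_eq, zgodneAltLoop_eq]
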